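-- pv_equiv track=rewrite | github.com/akshaykumar2310383/Mission-DSA | Hackerrank/PriyankaAndToys.py | toys
-- ===== SOURCE A (Python) =====
-- def toys(w):
--     if not w:
--         return 0
--     w.sort()
--     containers = 1
--     max_allowed_weight = w[0] + 4
--     for i in range(1, len(w)):
--         if w[i] > max_allowed_weight:
--             containers += 1
--             max_allowed_weight = w[i] + 4
--     return containers
-- ===== SOURCE B (Python) =====
-- def toys(w):
--     # Greedy on the sorted list, but instead of a flat linear scan the next
--     # container's anchor is found by a hand-written binary search jump:
--     # the first toy heavier than anchor + 4.
--     w.sort()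
--     n = len(w)
--     count = 0
--     i = 0
--     while i < n:
--         count += 1
--         limit = w[i] + 4
--         lo, hi = i + 1, n
--         while lo < hi:
--             mid = (lo + hi) // 2
--             if w[mid] <= limit:
--                 lo = mid + 1
--             else:
--                 hi = mid
--         i = lo
--     return count
-- ===== Notes on version B (the rewrite author's own statement) =====
-- stated objective: alternative
-- what changed: A's flat linear pass carrying a (containers, max_allowed_weight) state pair is replaced by binary-search jumps on the sorted list: each container's next anchor is located by a hand-written bisect for the first toy heavier than anchor+4, so the scan is O(g log n) index jumps instead of an element-by-element pass; both sort w in place.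
import Mathlib
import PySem

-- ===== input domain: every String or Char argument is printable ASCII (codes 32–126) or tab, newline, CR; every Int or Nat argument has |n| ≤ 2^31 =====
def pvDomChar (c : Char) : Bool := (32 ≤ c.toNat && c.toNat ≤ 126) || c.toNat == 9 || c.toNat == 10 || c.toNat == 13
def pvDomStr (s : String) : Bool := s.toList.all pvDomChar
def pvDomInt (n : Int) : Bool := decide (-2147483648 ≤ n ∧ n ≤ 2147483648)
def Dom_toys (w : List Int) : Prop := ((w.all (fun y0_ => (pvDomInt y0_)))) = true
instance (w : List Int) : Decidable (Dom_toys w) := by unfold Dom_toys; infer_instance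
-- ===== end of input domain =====

-- B replaces A's flat element-by-element pass (state pair (containers, max_allowed_weight))
-- by binary-search jumps on the sorted list: each container's next anchor is found by a
-- hand-written bisect for the first toy heavier than anchor+4 (alternative algorithm, same
-- asymptotic cost). Both A and B sort w in place in Python; the equivalence proved here is
-- about the return value.

-- ===== PORT A =====
-- for i in range(1, len(w)): flat scan over the sorted tail carrying (containers, max_allowed_weight)
def toysLoopA (st : Int × Int) (t : List Int) : Int × Int :=
  t.foldl (fun st x => if x > st.2 then (st.1 + 1, x + 4) else st) st

def toys (w : List Int) : Int :=
  if w = [] then 0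
  else
    match PySem.List.sorted w (fun x => x) false with
    | [] => 0
    | h :: t => (toysLoopA (1, h + 4) t).1

-- ===== PORT B =====
-- inner while lo < hi: mid = (lo+hi)//2; if w[mid] <= limit: lo = mid+1 else hi = mid
-- (w[mid] with 0 ≤ mid < len(w) always: List.getD is exact there; the fuel argument is
-- only a totality guard — hi - lo shrinks each step, and callers pass fuel ≥ hi - lo)
def bsearchB (ws : List Int) (limit : Int) : Nat → Nat → Nat → Nat
  | 0, lo, _ => lo
  | fuel + 1, lo, hi =>
    if lo < hi then
      let mid := (lo + hi) / 2
      if ws.getD mid 0 ≤ limit then bsearchB ws limit fuel (mid + 1) hi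
      else bsearchB ws limit fuel lo mid
    else lo

-- outer while i < n: count += 1; i jumps to the bisect result
-- (fuel is again only a totality guard: i strictly increases, callers pass fuel > n - i)
def outerB (ws : List Int) : Nat → Nat → Int
  | 0, _ => 0
  | fuel + 1, i =>
    if i < ws.length then
      1 + outerB ws fuel (bsearchB ws (ws.getD i 0 + 4) ws.length (i + 1) ws.length)
    else 0

def toys_alt (w : List Int) : Int :=
  outerB (PySem.List.sorted w (fun x => x) false) (w.length + 1) 0

-- ===== PRECONDITION & SPEC =====
def Spec_toys (w : List Int) (out : Int) : Prop := out = toys_alt w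
instance (w : List Int) (out : Int) : Decidable (Spec_toys w out) := by unfold Spec_toys; infer_instance

-- ===== CLAIM (what is proved, stated in full; the proofs are below) =====
def Claim_equal_toys : Prop := ∀ (w : List Int), Dom_toys w → Spec_toys w (toys w)

-- ===== LEMMAS AND PROOFS =====

-- proof-side reference function: greedy grouping as a structural recursion with dropWhile
def toysLoopB : List Int → Int
  | [] => 0
  | a :: rest => 1 + toysLoopB (rest.dropWhile (fun x => x ≤ a + 4))
termination_by s => s.length
decreasing_by
  simpa using Nat.lt_succ_of_le (List.length_dropWhile_le _ _)

-- A's flat fold from state (c, a+4) counts c plus the groups of what survives the first window.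
theorem loopA_eq_loopB (t : List Int) : ∀ (c a : Int),
    (toysLoopA (c, a + 4) t).1 = c + toysLoopB (t.dropWhile (fun x => x ≤ a + 4)) := by
  induction t with
  | nil => intro c a; simp [toysLoopA, toysLoopB]
  | cons x t ih =>
    intro c a
    by_cases h : x ≤ a + 4
    · have hgt : ¬ x > a + 4 := not_lt.mpr h
      simp only [toysLoopA, List.foldl_cons, List.dropWhile_cons, if_pos h, hgt,
        decide_eq_true_eq]
      exact ih c a
    · have hgt : x > a + 4 := lt_of_not_ge h
      simp only [toysLoopA, List.foldl_cons, List.dropWhile_cons, decide_eq_true_eq,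
        if_neg h, if_pos hgt]
      rw [show (List.foldl (fun st x => if x > st.2 then (st.1 + 1, x + 4) else st) (c + 1, x + 4) t) = toysLoopA (c + 1, x + 4) t from rfl, ih (c + 1) x, toysLoopB]
      ring

-- the binary search never returns an index below lo
theorem le_bsearchB (ws : List Int) (limit : Int) :
    ∀ fuel lo hi, lo ≤ bsearchB ws limit fuel lo hi := by
  intro fuel
  induction fuel with
  | zero => intro lo hi; simp [bsearchB]
  | succ fuel ih =>
    intro lo hi
    simp only [bsearchB]
    split_ifs with h1 h2
    · exact le_trans (by omega) (ih ((lo + hi) / 2 + 1) hi)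
    · exact ih lo ((lo + hi) / 2)
    · exact le_refl lo

-- binary-search correctness on a list monotone in getD, with enough fuel
theorem bsearchB_spec (ws : List Int) (limit : Int)
    (hmono : ∀ p q : Nat, p ≤ q → q < ws.length → ws.getD p 0 ≤ ws.getD q 0) :
    ∀ fuel lo hi, hi - lo ≤ fuel → hi ≤ ws.length →
      (∀ j, hi ≤ j → j < ws.length → limit < ws.getD j 0) →
      (bsearchB ws limit fuel lo hi ≤ max lo hi) ∧
      (∀ j, lo ≤ j → j < bsearchB ws limit fuel lo hi → ws.getD j 0 ≤ limit) ∧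
      (bsearchB ws limit fuel lo hi < ws.length → limit < ws.getD (bsearchB ws limit fuel lo hi) 0) := by
  intro fuel
  induction fuel with
  | zero =>
    intro lo hi hfuel hhi hbig
    simp only [bsearchB]
    refine ⟨le_max_left _ _, fun j hj hjr => absurd (lt_of_le_of_lt hj hjr) (lt_irrefl _), ?_⟩
    intro hlt
    exact hbig lo (by omega) hlt
  | succ fuel ih =>
    intro lo hi hfuel hhi hbig
    simp only [bsearchB]
    split_ifs with h1 hle
    · -- lo < hi, ws[mid] ≤ limit: recurse right
      obtain ⟨ub, hin, hout⟩ := ih ((lo + hi) / 2 + 1) hi (by omega) hhi hbig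
      refine ⟨by omega, ?_, hout⟩
      intro j hj hjr
      rcases Nat.lt_or_ge j ((lo + hi) / 2 + 1) with hj' | hj'
      · exact le_trans (hmono j ((lo + hi) / 2) (by omega) (by omega)) hle
      · exact hin j hj' hjr
    · -- lo < hi, limit < ws[mid]: recurse left
      have hbig' : ∀ j, (lo + hi) / 2 ≤ j → j < ws.length → limit < ws.getD j 0 := by
        intro j hj hjn
        exact lt_of_not_ge (fun hcon => hle (le_trans (hmono ((lo + hi) / 2) j hj hjn) hcon))
      obtain ⟨ub, hin, hout⟩ := ih lo ((lo + hi) / 2) (by omega) (by omega) hbig'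
      exact ⟨by omega, hin, hout⟩
    · -- lo ≥ hi: return lo
      refine ⟨le_max_left _ _, fun j hj hjr => absurd (lt_of_le_of_lt hj hjr) (lt_irrefl _), ?_⟩
      intro hlt
      exact hbig lo (by omega) hlt

-- dropWhile p t = drop k t when the first k elements satisfy p and the k-th (if any) does not
theorem dropWhile_eq_drop (p : Int → Bool) :
    ∀ (t : List Int) (k : Nat), k ≤ t.length →
      (∀ j, j < k → p (t.getD j 0) = true) →
      (k < t.length → p (t.getD k 0) = false) →
      t.dropWhile p = t.drop k := by
  intro t
  induction t with
  | nil => intro k hk _ _; simp at hk; simp [hk]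
  | cons a t ih =>
    intro k hk h1 h2
    cases k with
    | zero =>
      have : p a = false := h2 (by simp)
      simp [this]
    | succ k' =>
      have ha : p a = true := h1 0 (by omega)
      simp only [List.dropWhile_cons, ha, if_true, List.drop_succ_cons]
      exact ih k' (by simpa using hk) (fun j hj => h1 (j + 1) (by omega))
        (fun hlt => h2 (by simpa using Nat.succ_lt_succ hlt))

-- the outer jump loop computes the greedy group count of the remaining suffix
theorem outerB_eq (ws : List Int)
    (hmono : ∀ p q : Nat, p ≤ q → q < ws.length → ws.getD p 0 ≤ ws.getD q 0) :
    ∀ (fuel i : Nat), ws.length - i < fuel → outerB ws fuel i = toysLoopB (ws.drop i) := by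
  intro fuel
  induction fuel with
  | zero => intro i hi; omega
  | succ fuel ih =>
    intro i hi
    by_cases h : i < ws.length
    · simp only [outerB, if_pos h]
      set limit := ws.getD i 0 + 4 with hlim
      set r := bsearchB ws limit ws.length (i + 1) ws.length with hr
      have hrlo : i + 1 ≤ r := le_bsearchB ws limit ws.length (i + 1) ws.length
      obtain ⟨hub, hin, hout⟩ := bsearchB_spec ws limit hmono ws.length (i + 1) ws.length
        (by omega) (le_refl _) (fun j hj hjn => absurd (lt_of_le_of_lt hj hjn) (lt_irrefl _))
      have hrhi : r ≤ ws.length := le_trans hub (by omega)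
      have hdw : (ws.drop (i + 1)).dropWhile (fun x => x ≤ limit) = ws.drop r := by
        have hk : r - (i + 1) ≤ (ws.drop (i + 1)).length := by
          simp only [List.length_drop]; omega
        rw [dropWhile_eq_drop (fun x => decide (x ≤ limit)) (ws.drop (i + 1)) (r - (i + 1)) hk
          ?_ ?_]
        · rw [List.drop_drop]; congr 1; omega
        · intro j hj
          have hidx : i + 1 + j < ws.length := by omega
          have : (ws.drop (i + 1)).getD j 0 = ws.getD (i + 1 + j) 0 := by
            rw [List.getD_eq_getElem _ _ (by simpa [List.length_drop] using (by omega : j < ws.length - (i+1))),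
              List.getD_eq_getElem _ _ hidx, List.getElem_drop]
          rw [this]
          simpa using hin (i + 1 + j) (by omega) (by omega)
        · intro hlt
          have hrn : r < ws.length := by simp only [List.length_drop] at hlt; omega
          have : (ws.drop (i + 1)).getD (r - (i + 1)) 0 = ws.getD r 0 := by
            rw [List.getD_eq_getElem _ _ (by simpa [List.length_drop] using (by omega : r - (i+1) < ws.length - (i+1))),
              List.getD_eq_getElem _ _ hrn, List.getElem_drop]
            congr 1; omega
          rw [this]
          simpa using not_le_of_gt (hout hrn)
      have hdropi : ws.drop i = ws.getD i 0 :: ws.drop (i + 1) := by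
        rw [List.getD_eq_getElem _ _ h]
        exact List.drop_eq_getElem_cons h
      rw [hdropi, toysLoopB]
      rw [show (fun x => decide (x ≤ ws.getD i 0 + 4)) = (fun x => decide (x ≤ limit)) from rfl] at *
      rw [hdw, ih r (by omega)]
    · simp only [outerB, if_neg h]
      rw [List.drop_eq_nil_of_le (by omega), toysLoopB]

-- ===== VERDICT (by name: the statement is the Claim_ definition above) =====
theorem toys_spec : Claim_equal_toys := by
  intro w _
  unfold Spec_toys toys toys_alt
  have hmono : ∀ p q : Nat, p ≤ q → q < (PySem.List.sorted w (fun x => x) false).length →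
      (PySem.List.sorted w (fun x => x) false).getD p 0 ≤ (PySem.List.sorted w (fun x => x) false).getD q 0 := by
    intro p q hpq hq
    rw [List.getD_eq_getElem _ _ (lt_of_le_of_lt hpq hq), List.getD_eq_getElem _ _ hq]
    exact PySem.List.sorted_id_getElem_mono w hpq hq
  have hlen : (PySem.List.sorted w (fun x => x) false).length = w.length :=
    PySem.List.length_sorted ..
  rw [outerB_eq _ hmono (w.length + 1) 0 (by omega), List.drop_zero]
  by_cases hw : w = []
  · simp [hw, PySem.List.sorted, toysLoopB]
  · simp only [if_neg hw]
    cases hs : PySem.List.sorted w (fun x => x) false with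
    | nil =>
      exfalso
      apply hw
      rw [hs] at hlen
      exact List.length_eq_zero_iff.mp hlen.symm
    | cons h t =>
      show (toysLoopA (1, h + 4) t).1 = toysLoopB (h :: t)
      rw [loopA_eq_loopB t 1 h, toysLoopB]
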